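-- pv_equiv track=rewrite | github.com/masonsbro/spring-2017-contests-solutions | 02-24/5/ac/author.py | solve_fast_memo
-- ===== SOURCE A (Python) =====
-- def solve_fast_memo(n, memo):
--     if n < 0:
--         return 0
--     if n == 0:
--         return 1
--
--     if n in memo:
--         return memo[n]
--
--     num_ways_from_n = 0
--
--     for i in range(0, n):
--         num_ways_from_n = (num_ways_from_n + solve_fast_memo(i,memo)) % 1000000007
--
--     num_ways_from_n = (num_ways_from_n + solve_fast_memo(n-1,memo) + solve_fast_memo(n-2,memo)) % 1000000007
--
--     memo[n] = num_ways_from_n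
--
--     return num_ways_from_n % 1000000007
-- ===== SOURCE B (Python) =====
-- def solve_fast_memo(n, memo):
--     if n < 0:
--         return 0
--     if n == 0:
--         return 1
--     if n in memo:
--         return memo[n]
--     p = 1000000007
--     s = 0       # running (mod-p iterated) prefix sum of values v(0..k-1)
--     prev = 1    # v(0)
--     prev2 = 0   # v(-1)
--     for k in range(1, n + 1):
--         s = (s + prev) % p
--         if k in memo:
--             cur = memo[k]
--         else:
--             cur = (s + prev + prev2) % p
--             memo[k] = cur
--         prev2, prev = prev, cur
--     return prev
-- ===== Notes on version B (the rewrite author's own statement) =====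
-- stated objective: alternative
-- what changed: Replaced the memoized recursion whose inner loop re-sums all previous values with a single bottom-up loop that carries a running mod-p prefix sum and the last two values, consulting the supplied memo the same way.
import Mathlib
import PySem

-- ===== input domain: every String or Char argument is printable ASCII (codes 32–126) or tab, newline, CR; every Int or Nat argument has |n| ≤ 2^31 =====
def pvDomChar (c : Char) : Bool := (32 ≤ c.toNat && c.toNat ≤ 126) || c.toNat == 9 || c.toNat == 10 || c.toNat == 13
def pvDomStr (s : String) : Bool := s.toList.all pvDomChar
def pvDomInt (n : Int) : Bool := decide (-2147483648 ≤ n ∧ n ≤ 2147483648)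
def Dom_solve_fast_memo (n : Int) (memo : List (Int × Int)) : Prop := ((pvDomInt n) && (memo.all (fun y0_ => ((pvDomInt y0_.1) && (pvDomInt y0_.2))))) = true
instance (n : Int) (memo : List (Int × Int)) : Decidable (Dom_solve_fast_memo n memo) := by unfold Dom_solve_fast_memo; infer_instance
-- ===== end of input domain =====

-- B replaces A's memoized recursion (whose inner loop re-sums all earlier values) by one
-- bottom-up pass carrying a running mod-p prefix sum; in Python both mutate the memo dict
-- identically, and the equivalence proved here is about the RETURN value.

-- ===== PORT A =====
-- A's recursive function, threading the (mutated) memo dict through every call.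
-- The inner 'for i in range(0, n)' is the foldl over (List.range n).attach (attach only
-- carries the bound i < n used for termination).  'solve_fast_memo(n-2, memo)' can hit
-- n-2 = -1, where Python returns 0 without touching the memo: the 'if m = 0' branch.
def pvGoA : Nat → PySem.Dict Int Int → Int × PySem.Dict Int Int
  | 0, memo => (1, memo)
  | (m+1), memo =>
    match memo.get? ((m : Int) + 1) with
    | some v => (v, memo)
    | none =>
      let st := (List.range (m+1)).attach.foldl
        (fun (st : Int × PySem.Dict Int Int) i =>
          let r := pvGoA i.1 st.2
          (PySem.Int.mod (st.1 + r.1) 1000000007, r.2))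
        ((0 : Int), memo)
      let ra := pvGoA m st.2
      let rb := if m = 0 then ((0 : Int), ra.2) else pvGoA (m-1) ra.2
      let w := PySem.Int.mod (st.1 + ra.1 + rb.1) 1000000007
      (PySem.Int.mod w 1000000007, rb.2.insert ((m : Int) + 1) w)
termination_by m _ => m
decreasing_by
  · have := i.2; simp [List.mem_range] at this; omega
  · omega
  · omega

def solve_fast_memo (n : Int) (memo : List (Int × Int)) : Int :=
  if n < 0 then 0 else (pvGoA n.toNat (PySem.Dict.mk memo)).1

-- ===== PORT B =====
-- one step of B's loop: state (s, prev, prev2); k is the current index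
def pvStepB (memo : PySem.Dict Int Int) (st : Int × Int × Int) (k : Int) : Int × Int × Int :=
  let s := PySem.Int.mod (st.1 + st.2.1) 1000000007
  let cur := match memo.get? k with
             | some v => v
             | none => PySem.Int.mod (s + st.2.1 + st.2.2) 1000000007
  (s, cur, st.2.1)

def solve_fast_memo_alt (n : Int) (memo : List (Int × Int)) : Int :=
  if n < 0 then 0
  else if n = 0 then 1
  else
    match (PySem.Dict.mk memo).get? n with
    | some v => v
    | none => ((PySem.List.pyRange 1 (n+1) 1).foldl (pvStepB (PySem.Dict.mk memo)) (0, 1, 0)).2.1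

-- ===== PRECONDITION & SPEC =====
def Spec_solve_fast_memo (n : Int) (memo : List (Int × Int)) (out : Int) : Prop := out = solve_fast_memo_alt n memo
instance (n : Int) (memo : List (Int × Int)) (out : Int) : Decidable (Spec_solve_fast_memo n memo out) := by unfold Spec_solve_fast_memo; infer_instance

-- ===== CLAIM (what is proved, stated in full; the proofs are below) =====
def Claim_equal_solve_fast_memo : Prop := ∀ (n : Int) (memo : List (Int × Int)), Dom_solve_fast_memo n memo → Spec_solve_fast_memo n memo (solve_fast_memo n memo)

-- ===== LEMMAS AND PROOFS =====

-- B's loop state after k steps, as a function of k (proof-side recast of the foldl)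
def pvAux (memo : PySem.Dict Int Int) : Nat → Int × Int × Int
  | 0 => (0, 1, 0)
  | (k+1) => pvStepB memo (pvAux memo k) ((k : Int) + 1)

-- the value sequence both programs compute
def pvV (memo : PySem.Dict Int Int) (k : Nat) : Int := (pvAux memo k).2.1

-- memo states reachable by A: original entries untouched, plus entries (j, pvV j) for absent keys j ≥ 1
def pvExt (memo0 memo : PySem.Dict Int Int) : Prop :=
  ∀ j : Int, memo.get? j = memo0.get? j ∨
    (memo0.get? j = none ∧ ∃ k : Nat, 1 ≤ k ∧ j = (k : Int) ∧ memo.get? j = some (pvV memo0 k))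

theorem pvExt_refl (memo0 : PySem.Dict Int Int) : pvExt memo0 memo0 := fun _ => Or.inl rfl

theorem pvMod_idem (a : Int) :
    PySem.Int.mod (PySem.Int.mod a 1000000007) 1000000007 = PySem.Int.mod a 1000000007 := by
  rw [PySem.Int.mod_eq_emod_of_pos (by norm_num), PySem.Int.mod_eq_emod_of_pos (by norm_num)]
  exact Int.emod_emod_of_dvd a dvd_rfl

theorem pvAux_snd_snd (memo0 : PySem.Dict Int Int) (m : Nat) :
    (pvAux memo0 (m+1)).2.2 = pvV memo0 m := rfl

theorem pvAux_fst_succ (memo0 : PySem.Dict Int Int) (m : Nat) :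
    (pvAux memo0 (m+1)).1 = PySem.Int.mod ((pvAux memo0 m).1 + pvV memo0 m) 1000000007 := rfl

theorem pvV_succ (memo0 : PySem.Dict Int Int) (m : Nat) :
    pvV memo0 (m+1) =
      match memo0.get? ((m : Int) + 1) with
      | some v => v
      | none => PySem.Int.mod ((pvAux memo0 (m+1)).1 + pvV memo0 m + (pvAux memo0 m).2.2) 1000000007 := by
  simp only [pvV, pvAux, pvStepB]

-- the B fold over range(1, m+1) is pvAux m
theorem pvFoldB_eq_aux (memo0 : PySem.Dict Int Int) (m : Nat) :
    (PySem.List.pyRange 1 ((m : Int) + 1) 1).foldl (pvStepB memo0) (0, 1, 0) = pvAux memo0 m := by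
  induction m with
  | zero => simp [PySem.List.pyRange_one_eq_nil, pvAux]
  | succ k ih =>
    rw [show ((k+1 : Nat) : Int) + 1 = ((k : Int) + 1) + 1 by push_cast; ring,
        PySem.List.pyRange_one_succ_right (by omega), List.foldl_append, ih]
    rfl

-- iterated mod-sum of pvV over range k = B's running prefix component
theorem pvSum_eq_aux (memo0 : PySem.Dict Int Int) (k : Nat) :
    (List.range k).foldl (fun s j => PySem.Int.mod (s + pvV memo0 j) 1000000007) 0
      = (pvAux memo0 k).1 := by
  induction k with
  | zero => simp [pvAux]
  | succ k ih => rw [List.range_succ, List.foldl_append, List.foldl_cons, List.foldl_nil,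
                     ih, pvAux_fst_succ]

-- A's inner summation loop, given that pvGoA is already correct below the bound
theorem pvLoopA_spec (memo0 : PySem.Dict Int Int) (k : Nat)
    (H : ∀ j, j < k → ∀ mm, pvExt memo0 mm →
      (pvGoA j mm).1 = pvV memo0 j ∧ pvExt memo0 (pvGoA j mm).2) :
    ∀ (num : Int) (mm : PySem.Dict Int Int), pvExt memo0 mm →
      ((List.range k).foldl
          (fun (st : Int × PySem.Dict Int Int) (j : Nat) =>
            (PySem.Int.mod (st.1 + (pvGoA j st.2).1) 1000000007, (pvGoA j st.2).2)) (num, mm)).1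
        = (List.range k).foldl (fun s j => PySem.Int.mod (s + pvV memo0 j) 1000000007) num ∧
      pvExt memo0 (((List.range k).foldl
          (fun (st : Int × PySem.Dict Int Int) (j : Nat) =>
            (PySem.Int.mod (st.1 + (pvGoA j st.2).1) 1000000007, (pvGoA j st.2).2)) (num, mm)).2) := by
  induction k with
  | zero => intro num mm hmm; exact ⟨rfl, hmm⟩
  | succ k ih =>
    intro num mm hmm
    have ih' := ih (fun j hj => H j (by omega)) num mm hmm
    have hk := H k (by omega) _ ih'.2
    rw [List.range_succ, List.foldl_append, List.foldl_append, List.foldl_cons, List.foldl_nil,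
        List.foldl_cons, List.foldl_nil]
    exact ⟨by simp only [← ih'.1, hk.1], hk.2⟩

-- the attach in A's port only carried the termination bound
theorem pvFoldl_attach_elim (m : Nat) (b : Int × PySem.Dict Int Int) :
    (List.range m).attach.foldl
        (fun (st : Int × PySem.Dict Int Int) (i : {x // x ∈ List.range m}) =>
          (PySem.Int.mod (st.1 + (pvGoA i.1 st.2).1) 1000000007, (pvGoA i.1 st.2).2)) b
      = (List.range m).foldl
        (fun (st : Int × PySem.Dict Int Int) (j : Nat) =>
          (PySem.Int.mod (st.1 + (pvGoA j st.2).1) 1000000007, (pvGoA j st.2).2)) b :=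
  List.foldl_attach
    (f := fun (st : Int × PySem.Dict Int Int) (j : Nat) =>
      (PySem.Int.mod (st.1 + (pvGoA j st.2).1) 1000000007, (pvGoA j st.2).2))

-- main A-side invariant: from any pvExt-reachable memo, pvGoA m returns pvV m and stays reachable
theorem pvGoA_spec (memo0 : PySem.Dict Int Int) :
    ∀ m memo, pvExt memo0 memo →
      (pvGoA m memo).1 = pvV memo0 m ∧ pvExt memo0 (pvGoA m memo).2 := by
  intro m
  induction m using Nat.strong_induction_on with
  | _ m ih =>
  intro memo hext
  match m with
  | 0 => rw [pvGoA]; exact ⟨rfl, hext⟩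
  | (m+1) =>
    rw [pvGoA]
    cases hget : memo.get? ((m : Int) + 1) with
    | some v =>
      have hv : v = pvV memo0 (m+1) := by
        rcases hext ((m : Int) + 1) with h0 | ⟨h0, k, hk1, hkj, hkv⟩
        · have h1 : memo0.get? ((m : Int) + 1) = some v := by rw [← h0, hget]
          rw [pvV_succ, h1]
        · rw [hget] at hkv
          have hk : k = m + 1 := by exact_mod_cast hkj.symm
          cases hkv; rw [hk]
      exact ⟨hv, hext⟩
    | none =>
      have h0 : memo0.get? ((m : Int) + 1) = none := by
        rcases hext ((m : Int) + 1) with h0 | ⟨h0, _⟩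
        · rw [← h0, hget]
        · exact h0
      simp only [pvFoldl_attach_elim]
      obtain ⟨hL1, hL2⟩ := pvLoopA_spec memo0 (m+1)
        (fun j hj mm hmm => ih j (by omega) mm hmm) 0 memo hext
      rw [hL1, pvSum_eq_aux]
      obtain ⟨hra1, hra2⟩ := ih m (by omega) _ hL2
      rw [hra1]
      have hrb : ∀ (z : Int × PySem.Dict Int Int), pvExt memo0 z.2 →
          ((if m = 0 then ((0 : Int), z.2) else pvGoA (m-1) z.2).1 = (pvAux memo0 m).2.2 ∧
           pvExt memo0 (if m = 0 then ((0 : Int), z.2) else pvGoA (m-1) z.2).2) := by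
        intro z hz
        by_cases hm : m = 0
        · subst hm; simpa [pvAux] using hz
        · obtain ⟨m', rfl⟩ := Nat.exists_eq_succ_of_ne_zero hm
          have h := ih m' (by omega) _ hz
          simp only [if_neg hm, Nat.succ_sub_one]
          exact ⟨by rw [h.1, pvAux_snd_snd], h.2⟩
      obtain ⟨hrb1, hrb2⟩ := hrb _ hra2
      rw [hrb1]
      have hw : PySem.Int.mod ((pvAux memo0 (m+1)).1 + pvV memo0 m + (pvAux memo0 m).2.2) 1000000007
          = pvV memo0 (m+1) := by rw [pvV_succ, h0]
      refine ⟨by rw [hw, ← hw, pvMod_idem, hw], ?_⟩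
      intro j
      by_cases hj : j = (m : Int) + 1
      · subst hj
        right
        refine ⟨h0, m+1, by omega, by push_cast; ring, ?_⟩
        rw [PySem.Dict.get?_insert_self, hw]
      · rcases hrb2 j with h | ⟨ha, k, hk1, hkj, hkv⟩
        · left; rw [PySem.Dict.get?_insert_of_ne _ _ hj, h]
        · right; exact ⟨ha, k, hk1, hkj, by rw [PySem.Dict.get?_insert_of_ne _ _ hj, hkv]⟩

-- ===== VERDICT (by name: the statement is the Claim_ definition above) =====
theorem solve_fast_memo_spec : Claim_equal_solve_fast_memo := by
  intro n memo _
  unfold Spec_solve_fast_memo solve_fast_memo solve_fast_memo_alt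
  by_cases hneg : n < 0
  · simp [hneg]
  · simp only [if_neg hneg]
    have hA := (pvGoA_spec (PySem.Dict.mk memo) n.toNat _ (pvExt_refl _)).1
    rw [hA]
    by_cases h0 : n = 0
    · subst h0; simp [pvV, pvAux]
    · simp only [if_neg h0]
      obtain ⟨m, hm⟩ : ∃ m, n.toNat = m + 1 :=
        ⟨n.toNat - 1, by omega⟩
      have hcast : ((m : Int) + 1) = n := by
        have : ((n.toNat : Nat) : Int) = n := Int.toNat_of_nonneg (by omega)
        rw [hm] at this; push_cast at this; linarith
      rw [hm]
      cases hget : (PySem.Dict.mk memo).get? n with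
      | some v => rw [pvV_succ, hcast, hget]
      | none =>
        rw [show n + 1 = ((m : Int) + 1) + 1 by omega,
            show ((m : Int) + 1) = ((m+1 : Nat) : Int) by push_cast; ring,
            pvFoldB_eq_aux]
        rfl
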